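-- pv_equiv track=rewrite | github.com/KasumiUtako1130/TextSegmentation | 1.py | split_markdown_table
-- ===== SOURCE A (Python) =====
-- def split_markdown_table(text: str, chunk_size: int = 500) -> list[str]:
--     """表格切分：尽量带表头，按行拆"""
--     lines = text.strip().splitlines()
--     header = lines[0] + "\n" + lines[1]  # 表头+分隔线
--     rows = lines[2:]
--
--     chunks, current = [], []
--     for row in rows:
--         current.append(row)
--         # 控制 chunk 大小（这里简化用行数）
--         if len(current) >= chunk_size // 50:
--             chunks.append(header + "\n" + "\n".join(current))
--             current = []
--     if current:
--         chunks.append(header + "\n" + "\n".join(current))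
--     return chunks
-- ===== SOURCE B (Python) =====
-- def split_markdown_table(text: str, chunk_size: int = 500) -> list[str]:
--     """表格切分：尽量带表头，按行拆"""
--     lines = text.strip().splitlines()
--     header = lines[0] + "\n" + lines[1]
--     rows = lines[2:]
--     # A flushes after every row when chunk_size // 50 <= 0, so the stride is at least 1.
--     step = max(chunk_size // 50, 1)
--     chunks = []
--     while rows:
--         chunks.append(header + "\n" + "\n".join(rows[:step]))
--         rows = rows[step:]
--     return chunks
-- ===== Notes on version B (the rewrite author's own statement) =====
-- stated objective: simpler
-- what changed: Replaces A's accumulate-and-flush row buffer (append each row, test the buffer length against chunk_size//50, flush, plus a trailing flush) by computing the stride max(chunk_size//50,1) once and slicing fixed-size blocks off the front of the row list in a while loop.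
import Mathlib
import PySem

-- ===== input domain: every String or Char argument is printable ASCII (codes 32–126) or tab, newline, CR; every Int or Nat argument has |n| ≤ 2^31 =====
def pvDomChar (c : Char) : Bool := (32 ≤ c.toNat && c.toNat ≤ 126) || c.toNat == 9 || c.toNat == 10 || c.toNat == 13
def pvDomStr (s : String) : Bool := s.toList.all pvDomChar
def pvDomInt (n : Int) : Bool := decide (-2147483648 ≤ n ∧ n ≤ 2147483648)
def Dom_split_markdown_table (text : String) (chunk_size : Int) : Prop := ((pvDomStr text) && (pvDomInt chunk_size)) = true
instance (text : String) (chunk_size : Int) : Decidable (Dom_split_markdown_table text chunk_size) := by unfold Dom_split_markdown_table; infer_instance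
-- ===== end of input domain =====

-- B replaces A's accumulate-and-flush row buffer by slicing fixed-size blocks with stride
-- max(chunk_size // 50, 1) computed once (objective: simpler). Proved equal on all inputs with
-- at least two lines (elsewhere both Pythons raise IndexError).

-- ===== PORT A =====
-- the loop body: state (chunks, current); append row, flush when len(current) >= chunk_size // 50
def pvStepA (header : String) (d : Int) (st : List String × List String) (row : String) :
    List String × List String :=
  let current := st.2 ++ [row]
  if d ≤ (current.length : Int) then
    (st.1 ++ [header ++ "\n" ++ PySem.Str.join "\n" current], [])
  else (st.1, current)

def split_markdown_table (text : String) (chunk_size : Int) : List String :=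
  let lines := PySem.Str.splitlines (PySem.Str.strip text)
  -- lines[0] / lines[1]: pyGetD, in range under Pre_
  let header := PySem.List.pyGetD lines 0 "" ++ "\n" ++ PySem.List.pyGetD lines 1 ""
  let rows := PySem.List.slice lines (some 2) none
  let p := rows.foldl (pvStepA header (PySem.Int.floordiv chunk_size 50)) ([], [])
  if p.2 ≠ [] then p.1 ++ [header ++ "\n" ++ PySem.Str.join "\n" p.2] else p.1

-- ===== PORT B =====
-- the while loop: while rows: take a block rows[:step], continue with rows[step:]
-- (for a Nat step, rows[:step] is List.take step and rows[step:] is List.drop step —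
--  exact by PySem.List.slice_to_natCast / slice_from_natCast)
def pvWhileB (header : String) (step : Nat) (hstep : 0 < step) :
    List String → List String → List String
  | [], chunks => chunks
  | r :: rs, chunks =>
      pvWhileB header step hstep ((r :: rs).drop step)
        (chunks ++ [header ++ "\n" ++ PySem.Str.join "\n" ((r :: rs).take step)])
  termination_by rows => rows.length
  decreasing_by simp; omega

def split_markdown_table_alt (text : String) (chunk_size : Int) : List String :=
  let lines := PySem.Str.splitlines (PySem.Str.strip text)
  let header := PySem.List.pyGetD lines 0 "" ++ "\n" ++ PySem.List.pyGetD lines 1 ""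
  let rows := PySem.List.slice lines (some 2) none
  -- step = max(chunk_size // 50, 1), a positive Nat
  let step := max (PySem.Int.floordiv chunk_size 50).toNat 1
  pvWhileB header step (Nat.lt_of_lt_of_le Nat.one_pos (Nat.le_max_right _ 1)) rows []

-- ===== PRECONDITION & SPEC =====
-- Pre_ excludes texts whose stripped form has fewer than two lines: there Python A (and B) raises IndexError on lines[1].
def Pre_split_markdown_table (text : String) (chunk_size : Int) : Prop :=
  2 ≤ (PySem.Str.splitlines (PySem.Str.strip text)).length
instance (text : String) (chunk_size : Int) : Decidable (Pre_split_markdown_table text chunk_size) := by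
  unfold Pre_split_markdown_table; infer_instance
def pvWitness_split_markdown_table : String × Int := ("a|b\n-|-\nx|1\ny|2\nz|3", 100)

def Spec_split_markdown_table (text : String) (chunk_size : Int) (out : List String) : Prop := out = split_markdown_table_alt text chunk_size
instance (text : String) (chunk_size : Int) (out : List String) : Decidable (Spec_split_markdown_table text chunk_size out) := by unfold Spec_split_markdown_table; infer_instance

-- ===== CLAIM (what is proved, stated in full; the proofs are below) =====
def Claim_equal_split_markdown_table : Prop := ∀ (text : String) (chunk_size : Int), Dom_split_markdown_table text chunk_size → Pre_split_markdown_table text chunk_size → Spec_split_markdown_table text chunk_size (split_markdown_table text chunk_size)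


-- ===== LEMMAS AND PROOFS =====

-- A's flush test 'd <= len(current)' on a nonempty buffer is exactly 'max(d,1).toNat <= len'
theorem pv_flush_iff (d : Int) (n : Nat) (hn : 1 ≤ n) :
    (d ≤ (n : Int)) ↔ max d.toNat 1 ≤ n := by
  have h2 : d.toNat ≤ max d.toNat 1 := Nat.le_max_left _ _
  rcases max_choice d.toNat 1 with h | h <;> rw [h] at h2 ⊢ <;> omega

-- no flush while the buffer stays strictly below the stride
theorem pv_no_flush (header : String) (d : Int) :
    ∀ (rows cur chunks : List String),
      cur.length + rows.length < max d.toNat 1 →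
      rows.foldl (pvStepA header d) (chunks, cur) = (chunks, cur ++ rows) := by
  intro rows
  induction rows with
  | nil => intro cur chunks _; simp
  | cons r rs ih =>
      intro cur chunks h
      simp only [List.foldl_cons, pvStepA]
      rw [if_neg]
      · rw [ih (cur ++ [r]) chunks (by simp at h ⊢; omega)]
        simp
      · rw [pv_flush_iff d _ (by simp)]
        simp at h ⊢; omega

-- filling the buffer up to the stride flushes exactly the next k rows
theorem pv_fill_flush (header : String) (d : Int) :
    ∀ (rows cur chunks : List String) (k : Nat),
      cur.length + k = max d.toNat 1 → 1 ≤ k → k ≤ rows.length →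
      rows.foldl (pvStepA header d) (chunks, cur) =
        (rows.drop k).foldl (pvStepA header d)
          (chunks ++ [header ++ "\n" ++ PySem.Str.join "\n" (cur ++ rows.take k)], []) := by
  intro rows
  induction rows with
  | nil => intro cur chunks k _ hk hlen; simp at hlen; omega
  | cons r rs ih =>
      intro cur chunks k hsum hk hlen
      obtain ⟨m, rfl⟩ : ∃ m, k = m + 1 := ⟨k - 1, by omega⟩
      simp only [List.foldl_cons, pvStepA]
      rcases Nat.eq_zero_or_pos m with hm | hm
      · subst hm
        rw [if_pos]
        · simp
        · rw [pv_flush_iff d _ (by simp)]; simp at hsum ⊢; omega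
      · rw [if_neg]
        · rw [ih (cur ++ [r]) chunks m (by simp at hsum ⊢; omega) hm
              (by simp at hlen ⊢; omega)]
          simp
        · rw [pv_flush_iff d _ (by simp)]
          simp at hsum ⊢; omega

-- A's whole loop (fold + trailing flush) equals B's while loop, for any start chunks
theorem pv_main (header : String) (d : Int) (hstep : 0 < max d.toNat 1)
    (rows chunks : List String) :
      (let p := rows.foldl (pvStepA header d) (chunks, []);
        if p.2 ≠ [] then p.1 ++ [header ++ "\n" ++ PySem.Str.join "\n" p.2] else p.1) =
      pvWhileB header (max d.toNat 1) hstep rows chunks := by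
  induction rows, chunks using pvWhileB.induct header (max d.toNat 1) hstep with
  | case1 chunks => simp [pvWhileB]
  | case2 r rs chunks ih =>
      rw [pvWhileB]
      by_cases hle : (r :: rs).length < max d.toNat 1
      · -- short remainder: never flushes inside the fold, only the trailing flush fires
        rw [pv_no_flush header d (r :: rs) [] chunks (by simpa using hle)]
        have htk : (r :: rs).take (max d.toNat 1) = r :: rs := List.take_of_length_le (by omega)
        have hdr : (r :: rs).drop (max d.toNat 1) = [] := List.drop_eq_nil_of_le (by omega)
        rw [htk, hdr, pvWhileB]
        simp
      · -- a full block: the first max(d,1) rows flush, then recurse on the rest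
        rw [pv_fill_flush header d (r :: rs) [] chunks (max d.toNat 1) (by simp) hstep
            (by omega)]
        simpa using ih

-- ===== VERDICT (by name: the statement is the Claim_ definition above) =====
theorem split_markdown_table_spec : Claim_equal_split_markdown_table := by
  intro text chunk_size _ _
  unfold Spec_split_markdown_table split_markdown_table split_markdown_table_alt
  exact pv_main _ _ _ _ []
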